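-- pv_equiv track=rewrite | github.com/tudortudose/PP_Tudose_Tudor-Cristian_3A2 | Lab2/ex9.py | getBadLocations
-- ===== SOURCE A (Python) =====
-- def getBadLocations(matrix):
--     rows = len(matrix)
--     cols = len(matrix[0])
--     bad_locations = []
--     for c in range(cols):
--         tallest = 0
--         for r in range(rows):
--             if matrix[r][c] <= tallest:
--                 bad_locations += [(r, c)]
--             else:
--                 tallest = matrix[r][c]
--     return bad_locations
-- ===== SOURCE B (Python) =====
-- def getBadLocations(matrix):
--     rows = len(matrix)
--     cols = len(matrix[0])
--     # pass 1: per-column prefix-maximum table, seeded at 0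
--     prefixmax = []
--     for c in range(cols):
--         col_pm = []
--         m = 0
--         for r in range(rows):
--             col_pm.append(m)
--             m = max(m, matrix[r][c])
--         prefixmax.append(col_pm)
--     # pass 2: compare each cell against the running max of the cells above it
--     bad_locations = []
--     for c in range(cols):
--         for r in range(rows):
--             if matrix[r][c] <= prefixmax[c][r]:
--                 bad_locations.append((r, c))
--     return bad_locations
-- ===== Notes on version B (the rewrite author's own statement) =====
-- stated objective: alternative
-- what changed: B materializes a per-column prefix-maximum table in a first pass and then does a separate comparison pass, instead of A's single loop that interleaves the running-max update with the bad-cell test.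
import Mathlib
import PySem

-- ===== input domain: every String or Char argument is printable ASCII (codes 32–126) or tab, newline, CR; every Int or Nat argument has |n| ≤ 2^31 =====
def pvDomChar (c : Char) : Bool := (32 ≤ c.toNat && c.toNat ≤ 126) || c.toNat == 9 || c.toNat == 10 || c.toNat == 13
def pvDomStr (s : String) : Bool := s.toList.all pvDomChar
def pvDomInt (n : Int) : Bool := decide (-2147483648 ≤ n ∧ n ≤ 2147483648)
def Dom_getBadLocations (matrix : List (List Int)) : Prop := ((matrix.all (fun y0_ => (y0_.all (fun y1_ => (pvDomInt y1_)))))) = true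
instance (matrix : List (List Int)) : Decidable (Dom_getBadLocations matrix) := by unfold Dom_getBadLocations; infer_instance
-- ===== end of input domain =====

-- B replaces A's interleaved running-max loop by a two-pass decomposition (prefix-max table, then comparison pass); same cost, different structure.


-- ===== PORT A =====
-- matrix[r][c] under Pre_ is always in range; ported as getD (exact there).
def getBadLocations (matrix : List (List Int)) : List (Int × Int) :=
  let rows := matrix.length
  let cols := (matrix.headD []).length
  ((List.range cols).foldl (fun (bad : List (Int × Int)) c =>
    ((List.range rows).foldl (fun (st : List (Int × Int) × Int) r =>
        let v := (matrix.getD r []).getD c 0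
        if v ≤ st.2 then (st.1 ++ [((r : Int), (c : Int))], st.2)
        else (st.1, v))
      (bad, 0)).1) [])

-- ===== PORT B =====
-- pass 1 inner loop of Source B: build one column's prefix-max list (state = (col_pm, m))
def pvColPM (matrix : List (List Int)) (rows c : Nat) : List Int :=
  ((List.range rows).foldl (fun (st : List Int × Int) r =>
      (st.1 ++ [st.2], max st.2 ((matrix.getD r []).getD c 0)))
    ([], 0)).1

def getBadLocations_alt (matrix : List (List Int)) : List (Int × Int) :=
  let rows := matrix.length
  let cols := (matrix.headD []).length
  let prefixmax := (List.range cols).foldl (fun acc c => acc ++ [pvColPM matrix rows c]) []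
  (List.range cols).foldl (fun bad c =>
    (List.range rows).foldl (fun (bad2 : List (Int × Int)) r =>
      if (matrix.getD r []).getD c 0 ≤ (prefixmax.getD c []).getD r 0
      then bad2 ++ [((r : Int), (c : Int))] else bad2) bad) []

-- ===== PRECONDITION & SPEC =====
-- Pre_ excludes exactly the inputs where Python A raises IndexError: the empty matrix
-- (matrix[0]) and ragged matrices with some row shorter than the first row.
def Pre_getBadLocations (matrix : List (List Int)) : Prop :=
  matrix ≠ [] ∧ ∀ row ∈ matrix, (matrix.headD []).length ≤ row.length
instance (matrix : List (List Int)) : Decidable (Pre_getBadLocations matrix) := by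
  unfold Pre_getBadLocations; infer_instance
def pvWitness_getBadLocations : List (List Int) := [[1, 2], [0, 3]]
def Spec_getBadLocations (matrix : List (List Int)) (out : List (Int × Int)) : Prop := out = getBadLocations_alt matrix
instance (matrix : List (List Int)) (out : List (Int × Int)) : Decidable (Spec_getBadLocations matrix out) := by unfold Spec_getBadLocations; infer_instance

-- ===== CLAIM (what is proved, stated in full; the proofs are below) =====
def Claim_equal_getBadLocations : Prop := ∀ (matrix : List (List Int)), Dom_getBadLocations matrix → Pre_getBadLocations matrix → Spec_getBadLocations matrix (getBadLocations matrix)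

-- ===== LEMMAS AND PROOFS =====

-- running column maximum of f over indices < n, seeded at t
def pvPMax (f : Nat → Int) (t : Int) : Nat → Int
  | 0 => t
  | n + 1 => max (pvPMax f t n) (f n)

-- the bad cells of one column, in row order
def pvBads (f : Nat → Int) (c : Int) : Nat → List (Int × Int)
  | 0 => []
  | n + 1 => pvBads f c n ++ (if f n ≤ pvPMax f 0 n then [((n : Int), c)] else [])

theorem pvA_inner (f : Nat → Int) (c : Int) (n : Nat) (acc : List (Int × Int)) :
    (List.range n).foldl (fun (st : List (Int × Int) × Int) r =>
        if f r ≤ st.2 then (st.1 ++ [((r : Int), c)], st.2) else (st.1, f r)) (acc, 0)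
    = (acc ++ pvBads f c n, pvPMax f 0 n) := by
  induction n with
  | zero => simp [pvBads, pvPMax]
  | succ n ih =>
    rw [List.range_succ, List.foldl_append, ih]
    simp only [List.foldl_cons, List.foldl_nil, pvBads, pvPMax]
    by_cases h : f n ≤ pvPMax f 0 n
    · simp [h]
    · simp [h, max_eq_right (le_of_not_ge h)]

theorem pvColPM_eq (matrix : List (List Int)) (rows c : Nat) :
    pvColPM matrix rows c = (List.range rows).map (pvPMax (fun r => (matrix.getD r []).getD c 0) 0) := by
  unfold pvColPM
  suffices h : ∀ n, ((List.range n).foldl (fun (st : List Int × Int) r =>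
      (st.1 ++ [st.2], max st.2 ((matrix.getD r []).getD c 0))) ([], 0))
      = ((List.range n).map (pvPMax (fun r => (matrix.getD r []).getD c 0) 0),
         pvPMax (fun r => (matrix.getD r []).getD c 0) 0 n) by
    rw [h]
  intro n
  induction n with
  | zero => simp [pvPMax]
  | succ n ih =>
    rw [List.range_succ, List.foldl_append, ih]
    simp [pvPMax]

theorem pvB_inner (f : Nat → Int) (c : Int) (g : Nat → Int) (n : Nat) (acc : List (Int × Int))
    (hg : ∀ r < n, g r = pvPMax f 0 r) :
    (List.range n).foldl (fun (bad2 : List (Int × Int)) r =>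
        if f r ≤ g r then bad2 ++ [((r : Int), c)] else bad2) acc
    = acc ++ pvBads f c n := by
  induction n with
  | zero => simp [pvBads]
  | succ n ih =>
    rw [List.range_succ, List.foldl_append,
        ih (fun r hr => hg r (Nat.lt_succ_of_lt hr))]
    simp only [List.foldl_cons, List.foldl_nil, pvBads, hg n (Nat.lt_succ_self n)]
    by_cases h : f n ≤ pvPMax f 0 n <;> simp [h]

theorem pvPrefixmax_get (matrix : List (List Int)) (rows cols c : Nat) (hc : c < cols) :
    (((List.range cols).foldl (fun acc x => acc ++ [pvColPM matrix rows x]) []).getD c [])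
    = pvColPM matrix rows c := by
  have h : ∀ m, (List.range m).foldl (fun acc x => acc ++ [pvColPM matrix rows x]) []
      = (List.range m).map (pvColPM matrix rows) := by
    intro m
    induction m with
    | zero => simp
    | succ m ih => rw [List.range_succ, List.foldl_append, ih]; simp
  rw [h]
  rw [List.getD_eq_getElem?_getD]
  simp [hc]

-- ===== VERDICT (by name: the statement is the Claim_ definition above) =====
theorem getBadLocations_spec : Claim_equal_getBadLocations := by
  intro matrix _ _
  unfold Spec_getBadLocations getBadLocations getBadLocations_alt
  simp only []
  apply PySem.List.foldl_congr_mem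
  intro bad c hc
  have hc' : c < (matrix.headD []).length := List.mem_range.mp hc
  rw [pvA_inner (fun r => (matrix.getD r []).getD c 0) (c : Int) matrix.length bad]
  rw [pvB_inner (fun r => (matrix.getD r []).getD c 0) (c : Int)
      (fun r => ((((List.range (matrix.headD []).length).foldl
        (fun acc x => acc ++ [pvColPM matrix matrix.length x]) []).getD c []).getD r 0))
      matrix.length bad]
  intro r hr
  rw [pvPrefixmax_get matrix matrix.length _ c hc']
  rw [pvColPM_eq]
  rw [List.getD_eq_getElem?_getD]
  simp [hr]
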